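-- pv_equiv track=rewrite | github.com/Hadrien-Cornier/cool-nn-stuff | neural_search/chess_board.py | get_queen_moves
-- ===== SOURCE A (Python) =====
-- def get_queen_moves(i, j, piece):
--     moves = []
--     for x in range(-7, 8):
--         for y in range(-7, 8):
--             if abs(x) == abs(y) or x == 0 or y == 0:
--                 new_i = i + x
--                 new_j = j + y
--                 if 0 <= new_i < 8 and 0 <= new_j < 8:
--                     moves.append((piece,new_i, new_j))
--     return moves
-- ===== SOURCE B (Python) =====
-- DIRECTIONS = [(-1, -1), (-1, 0), (-1, 1), (0, -1), (0, 1), (1, -1), (1, 0), (1, 1)]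
--
-- def get_queen_moves(i, j, piece):
--     """Queen moves from (i, j): slide up to 7 squares along each of the 8 directions
--     (step 0 covers the origin square), keep the on-board squares, sort them."""
--     squares = set()
--     for di, dj in DIRECTIONS:
--         for step in range(8):
--             a, b = i + di * step, j + dj * step
--             if 0 <= a < 8 and 0 <= b < 8:
--                 squares.add((a, b))
--     return [(piece, a, b) for a, b in sorted(squares)]
-- ===== Notes on version B (the rewrite author's own statement) =====
-- stated objective: alternative
-- what changed: B is a standard direction-ray move generator: it slides up to 7 steps along each of the queen's 8 directions (step 0 covering the origin), collects on-board squares in a set and sorts, instead of A's scan of all 225 (x,y) offsets with a row/column/diagonal test and bounds filter.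
import Mathlib
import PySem

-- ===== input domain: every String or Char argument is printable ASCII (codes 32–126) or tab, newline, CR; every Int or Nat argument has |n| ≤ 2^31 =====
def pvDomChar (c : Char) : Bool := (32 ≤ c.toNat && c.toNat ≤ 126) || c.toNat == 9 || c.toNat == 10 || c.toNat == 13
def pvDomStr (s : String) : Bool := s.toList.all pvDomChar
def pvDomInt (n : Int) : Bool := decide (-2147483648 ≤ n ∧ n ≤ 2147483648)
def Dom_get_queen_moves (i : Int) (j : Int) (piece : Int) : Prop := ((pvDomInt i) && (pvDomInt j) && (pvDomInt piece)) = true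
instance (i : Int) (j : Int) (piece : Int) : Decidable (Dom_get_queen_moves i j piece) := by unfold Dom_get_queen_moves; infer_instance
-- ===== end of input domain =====

-- B generates the queen's squares by sliding up to 7 steps along each of the 8 directions
-- (set + sort), instead of A's scan of all 225 offsets (objective: alternative algorithm).

-- ===== PORT A =====
def get_queen_moves (i : Int) (j : Int) (piece : Int) : List (Int × Int × Int) :=
  (PySem.List.pyRange (-7) 8 1).foldl (fun moves x =>
    (PySem.List.pyRange (-7) 8 1).foldl (fun moves y =>
      if |x| = |y| ∨ x = 0 ∨ y = 0 then
        let new_i := i + x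
        let new_j := j + y
        if 0 ≤ new_i ∧ new_i < 8 ∧ 0 ≤ new_j ∧ new_j < 8 then
          moves ++ [(piece, new_i, new_j)]
        else moves
      else moves) moves) []

-- ===== PORT B =====
def pvDIRECTIONS : List (Int × Int) :=
  [(-1, -1), (-1, 0), (-1, 1), (0, -1), (0, 1), (1, -1), (1, 0), (1, 1)]

def get_queen_moves_alt (i : Int) (j : Int) (piece : Int) : List (Int × Int × Int) :=
  let squares : PySem.Set (Int × Int) :=
    pvDIRECTIONS.foldl (fun squares d =>
      (PySem.List.pyRange 0 8 1).foldl (fun squares step =>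
        let a := i + d.1 * step
        let b := j + d.2 * step
        if 0 ≤ a ∧ a < 8 ∧ 0 ≤ b ∧ b < 8 then PySem.Set.add squares (a, b) else squares)
        squares) PySem.Set.empty
  (PySem.List.sorted2 squares (fun q => q.1) (fun q => q.2)).map (fun q => (piece, q.1, q.2))

-- ===== PRECONDITION & SPEC =====
def Spec_get_queen_moves (i : Int) (j : Int) (piece : Int) (out : List (Int × Int × Int)) : Prop := out = get_queen_moves_alt i j piece
instance (i : Int) (j : Int) (piece : Int) (out : List (Int × Int × Int)) : Decidable (Spec_get_queen_moves i j piece out) := by unfold Spec_get_queen_moves; infer_instance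

-- ===== CLAIM (what is proved, stated in full; the proofs are below) =====
def Claim_equal_get_queen_moves : Prop := ∀ (i : Int) (j : Int) (piece : Int), Dom_get_queen_moves i j piece → Spec_get_queen_moves i j piece (get_queen_moves i j piece)

-- ===== LEMMAS AND PROOFS =====

-- the squares A's offset scan can produce, as a closed condition on the square
def pvCond (i j : Int) (q : Int × Int) : Prop :=
  0 ≤ q.1 ∧ q.1 < 8 ∧ 0 ≤ q.2 ∧ q.2 < 8 ∧ |q.1 - i| ≤ 7 ∧ |q.2 - j| ≤ 7 ∧
    (|q.1 - i| = |q.2 - j| ∨ q.1 = i ∨ q.2 = j)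

-- A's move list with the constant piece component stripped off
def pvP (i j : Int) : List (Int × Int) :=
  (PySem.List.pyRange (-7) 8 1).flatMap (fun x =>
    ((PySem.List.pyRange (-7) 8 1).filter (fun y =>
        decide ((|x| = |y| ∨ x = 0 ∨ y = 0) ∧ 0 ≤ i + x ∧ i + x < 8 ∧ 0 ≤ j + y ∧ j + y < 8))).map
      (fun y => (i + x, j + y)))

-- the set B builds, before sorting
def pvSq (i j : Int) : PySem.Set (Int × Int) :=
  pvDIRECTIONS.foldl (fun squares d =>
    (PySem.List.pyRange 0 8 1).foldl (fun squares step =>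
      if 0 ≤ i + d.1 * step ∧ i + d.1 * step < 8 ∧ 0 ≤ j + d.2 * step ∧ j + d.2 * step < 8 then
        PySem.Set.add squares (i + d.1 * step, j + d.2 * step)
      else squares) squares) PySem.Set.empty

lemma pv_alt_eq (i j piece : Int) :
    get_queen_moves_alt i j piece =
      (PySem.List.sorted2 (pvSq i j) (fun q => q.1) (fun q => q.2)).map (fun q => (piece, q.1, q.2)) := rfl

theorem pv_sorted2_eq_sorted_lex (xs : List (Int × Int)) :
    PySem.List.sorted2 xs (fun q => q.1) (fun q => q.2) =
      PySem.List.sorted xs (fun q => (toLex q : Lex (Int × Int))) := by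
  have hb : (fun (a b : Int × Int) => decide (a.1 < b.1) || (!decide (b.1 < a.1) && decide (a.2 < b.2)))
      = (fun (a b : Int × Int) => decide ((toLex a : Lex (Int × Int)) < toLex b)) := by
    funext a b
    apply Bool.eq_iff_iff.mpr
    simp only [Bool.or_eq_true, Bool.and_eq_true, Bool.not_eq_true', decide_eq_true_eq,
      decide_eq_false_iff_not, Prod.Lex.toLex_lt_toLex, not_lt]
    omega
  unfold PySem.List.sorted2 PySem.List.sorted
  simp only [Bool.false_eq_true, if_false, hb]

theorem pv_A_eq (i j piece : Int) :
    get_queen_moves i j piece = (pvP i j).map (fun q => (piece, q.1, q.2)) := by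
  unfold get_queen_moves pvP
  have hin : ∀ (x : Int) (moves : List (Int × Int × Int)),
      (PySem.List.pyRange (-7) 8 1).foldl (fun moves y =>
        if |x| = |y| ∨ x = 0 ∨ y = 0 then
          if 0 ≤ i + x ∧ i + x < 8 ∧ 0 ≤ j + y ∧ j + y < 8 then
            moves ++ [(piece, i + x, j + y)]
          else moves
        else moves) moves
      = moves ++ ((PySem.List.pyRange (-7) 8 1).filter (fun y =>
          decide ((|x| = |y| ∨ x = 0 ∨ y = 0) ∧ 0 ≤ i + x ∧ i + x < 8 ∧ 0 ≤ j + y ∧ j + y < 8))).map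
          (fun y => (piece, i + x, j + y)) := by
    intro x moves
    rw [← PySem.List.foldl_append_ite
      (p := fun y => (|x| = |y| ∨ x = 0 ∨ y = 0) ∧ 0 ≤ i + x ∧ i + x < 8 ∧ 0 ≤ j + y ∧ j + y < 8)
      (f := fun y => (piece, i + x, j + y))]
    apply PySem.List.foldl_congr_mem
    intro acc y _
    split_ifs <;> tauto
  simp only [hin]
  rw [PySem.List.foldl_append_eq_flatMap]
  simp [List.map_flatMap, List.map_map, Function.comp_def]

theorem pv_mem_P (i j : Int) (q : Int × Int) : q ∈ pvP i j ↔ pvCond i j q := by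
  simp only [pvP, pvCond, List.mem_flatMap, List.mem_map, List.mem_filter,
    PySem.List.mem_pyRange_one, decide_eq_true_eq, abs_le, abs_eq_abs, Prod.ext_iff]
  constructor
  · rintro ⟨x, ⟨hx1, hx2⟩, y, ⟨⟨⟨hy1, hy2⟩, hc, hb⟩, h1, h2⟩⟩
    obtain ⟨q1, q2⟩ := q
    simp_all
    omega
  · intro h
    refine ⟨q.1 - i, by omega, q.2 - j, ⟨⟨by omega, ?_, by omega⟩, by omega, by omega⟩⟩
    omega

theorem pv_pairwise_P (i j : Int) :
    (pvP i j).Pairwise (fun a b => (toLex a : Lex (Int × Int)) < toLex b) := by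
  unfold pvP
  rw [List.pairwise_flatMap]
  constructor
  · intro x _
    exact List.Pairwise.map _
      (fun y1 y2 (hlt : y1 < y2) => Prod.Lex.toLex_lt_toLex.mpr (Or.inr ⟨rfl, by omega⟩))
      ((PySem.List.pairwise_lt_pyRange_one (-7) 8).filter _)
  · apply (PySem.List.pairwise_lt_pyRange_one (-7) 8).imp
    intro x1 x2 hlt a ha b hb
    simp only [List.mem_map, List.mem_filter] at ha hb
    obtain ⟨y1, _, rfl⟩ := ha
    obtain ⟨y2, _, rfl⟩ := hb
    exact Prod.Lex.toLex_lt_toLex.mpr (Or.inl (by omega))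

theorem pv_nodup_P (i j : Int) : (pvP i j).Nodup := by
  apply (pv_pairwise_P i j).imp
  intro a b hlt h
  subst h; exact lt_irrefl _ hlt

-- one ray: membership in the inner fold over steps
theorem pv_mem_ray (i j : Int) (d : Int × Int) (l : List Int) (s : PySem.Set (Int × Int)) (q : Int × Int) :
    (q ∈ l.foldl (fun squares step =>
        if 0 ≤ i + d.1 * step ∧ i + d.1 * step < 8 ∧ 0 ≤ j + d.2 * step ∧ j + d.2 * step < 8 then
          PySem.Set.add squares (i + d.1 * step, j + d.2 * step)
        else squares) s)
    ↔ q ∈ s ∨ ∃ t ∈ l, 0 ≤ i + d.1 * t ∧ i + d.1 * t < 8 ∧ 0 ≤ j + d.2 * t ∧ j + d.2 * t < 8 ∧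
        q = (i + d.1 * t, j + d.2 * t) := by
  induction l generalizing s with
  | nil => simp
  | cons t l ih =>
    rw [List.foldl_cons, ih]
    simp only [List.mem_cons]
    split_ifs with h
    · rw [PySem.Set.mem_add]
      constructor
      · rintro ((h' | h') | ⟨t', ht', h'⟩)
        · exact Or.inl h'
        · exact Or.inr ⟨t, Or.inl rfl, h.1, h.2.1, h.2.2.1, h.2.2.2, h'⟩
        · exact Or.inr ⟨t', Or.inr ht', h'⟩
      · rintro (h' | ⟨t', (rfl | ht'), h'⟩)
        · exact Or.inl (Or.inl h')
        · exact Or.inl (Or.inr h'.2.2.2.2)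
        · exact Or.inr ⟨t', ht', h'⟩
    · constructor
      · rintro (h' | ⟨t', ht', h'⟩)
        · exact Or.inl h'
        · exact Or.inr ⟨t', Or.inr ht', h'⟩
      · rintro (h' | ⟨t', (rfl | ht'), h'⟩)
        · exact Or.inl h'
        · exact absurd ⟨h'.1, h'.2.1, h'.2.2.1, h'.2.2.2.1⟩ h
        · exact Or.inr ⟨t', ht', h'⟩

theorem pv_mem_fold (i j : Int) (dl : List (Int × Int)) (s : PySem.Set (Int × Int)) (q : Int × Int) :
    (q ∈ dl.foldl (fun squares d =>
        (PySem.List.pyRange 0 8 1).foldl (fun squares step =>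
          if 0 ≤ i + d.1 * step ∧ i + d.1 * step < 8 ∧ 0 ≤ j + d.2 * step ∧ j + d.2 * step < 8 then
            PySem.Set.add squares (i + d.1 * step, j + d.2 * step)
          else squares) squares) s)
    ↔ q ∈ s ∨ ∃ d ∈ dl, ∃ t, 0 ≤ t ∧ t < 8 ∧ 0 ≤ i + d.1 * t ∧ i + d.1 * t < 8 ∧
        0 ≤ j + d.2 * t ∧ j + d.2 * t < 8 ∧ q = (i + d.1 * t, j + d.2 * t) := by
  induction dl generalizing s with
  | nil => simp
  | cons d dl ih =>
    rw [List.foldl_cons, ih, pv_mem_ray]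
    simp only [List.mem_cons, PySem.List.mem_pyRange_one]
    constructor
    · rintro ((h | ⟨t, ⟨ht0, ht8⟩, h⟩) | ⟨d', hd', h⟩)
      · exact Or.inl h
      · exact Or.inr ⟨d, Or.inl rfl, t, ht0, ht8, h⟩
      · exact Or.inr ⟨d', Or.inr hd', h⟩
    · rintro (h | ⟨d', (rfl | hd'), t, ht0, ht8, h⟩)
      · exact Or.inl (Or.inl h)
      · exact Or.inl (Or.inr ⟨t, ⟨ht0, ht8⟩, h⟩)
      · exact Or.inr ⟨d', hd', t, ht0, ht8, h⟩

theorem pv_nodup_ray (i j : Int) (d : Int × Int) (l : List Int) (s : PySem.Set (Int × Int))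
    (hs : (s : List (Int × Int)).Nodup) :
    (l.foldl (fun squares step =>
        if 0 ≤ i + d.1 * step ∧ i + d.1 * step < 8 ∧ 0 ≤ j + d.2 * step ∧ j + d.2 * step < 8 then
          PySem.Set.add squares (i + d.1 * step, j + d.2 * step)
        else squares) s : List (Int × Int)).Nodup := by
  induction l generalizing s with
  | nil => exact hs
  | cons t l ih =>
    rw [List.foldl_cons]
    apply ih
    split_ifs <;> simp [PySem.Set.nodup_add, hs]

theorem pv_nodup_Sq (i j : Int) : (pvSq i j : List (Int × Int)).Nodup := by
  unfold pvSq
  have : ∀ (dl : List (Int × Int)) (s : PySem.Set (Int × Int)), (s : List (Int × Int)).Nodup →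
      (dl.foldl (fun squares d =>
        (PySem.List.pyRange 0 8 1).foldl (fun squares step =>
          if 0 ≤ i + d.1 * step ∧ i + d.1 * step < 8 ∧ 0 ≤ j + d.2 * step ∧ j + d.2 * step < 8 then
            PySem.Set.add squares (i + d.1 * step, j + d.2 * step)
          else squares) squares) s : List (Int × Int)).Nodup := by
    intro dl
    induction dl with
    | nil => exact fun s hs => hs
    | cons d dl ih => exact fun s hs => ih _ (pv_nodup_ray i j d _ s hs)
  exact this _ _ List.nodup_nil

theorem pv_mem_Sq (i j : Int) (q : Int × Int) : q ∈ pvSq i j ↔ pvCond i j q := by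
  unfold pvSq
  rw [pv_mem_fold]
  simp only [PySem.Set.empty, List.not_mem_nil, false_or]
  constructor
  · rintro ⟨d, hd, t, ht0, ht8, h1, h2, h3, h4, rfl⟩
    fin_cases hd <;>
      (simp only [pvCond, abs_le, abs_eq_abs] at * <;> constructor <;> omega)
  · rintro ⟨hq1, hq2, hq3, hq4, ha, hb, hline⟩
    obtain ⟨q1, q2⟩ := q
    simp only [abs_le, abs_eq_abs] at ha hb hline
    simp only [Prod.ext_iff]
    by_cases hx0 : q1 = i
    · by_cases hy0 : q2 = j
      · exact ⟨(-1, -1), by decide, 0, by omega, by omega, by omega, by omega, by omega, by omega,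
          by omega, by omega⟩
      · by_cases hyp : j < q2
        · exact ⟨(0, 1), by decide, q2 - j, by omega, by omega, by omega, by omega, by omega,
            by omega, by omega, by omega⟩
        · exact ⟨(0, -1), by decide, j - q2, by omega, by omega, by omega, by omega, by omega,
            by omega, by omega, by omega⟩
    · by_cases hy0 : q2 = j
      · by_cases hxp : i < q1
        · exact ⟨(1, 0), by decide, q1 - i, by omega, by omega, by omega, by omega, by omega,
            by omega, by omega, by omega⟩
        · exact ⟨(-1, 0), by decide, i - q1, by omega, by omega, by omega, by omega, by omega,
            by omega, by omega, by omega⟩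
      · have hdiag : q1 - i = q2 - j ∨ q1 - i = -(q2 - j) := by tauto
        by_cases hxp : i < q1
        · rcases hdiag with h | h
          · exact ⟨(1, 1), by decide, q1 - i, by omega, by omega, by omega, by omega, by omega,
              by omega, by omega, by omega⟩
          · exact ⟨(1, -1), by decide, q1 - i, by omega, by omega, by omega, by omega, by omega,
              by omega, by omega, by omega⟩
        · rcases hdiag with h | h
          · exact ⟨(-1, -1), by decide, i - q1, by omega, by omega, by omega, by omega, by omega,
              by omega, by omega, by omega⟩
          · exact ⟨(-1, 1), by decide, i - q1, by omega, by omega, by omega, by omega, by omega,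
              by omega, by omega, by omega⟩

-- ===== VERDICT (by name: the statement is the Claim_ definition above) =====
theorem get_queen_moves_spec : Claim_equal_get_queen_moves := by
  intro i j piece _
  unfold Spec_get_queen_moves
  rw [pv_alt_eq, pv_sorted2_eq_sorted_lex, pv_A_eq]
  have hperm : (pvP i j).Perm (pvSq i j) :=
    (List.perm_ext_iff_of_nodup (pv_nodup_P i j) (pv_nodup_Sq i j)).2
      (fun q => by rw [pv_mem_P, pv_mem_Sq])
  rw [PySem.List.sorted_eq_of_perm_of_pairwise_lt _ _ _ hperm (pv_pairwise_P i j)]
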